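-- pv_equiv track=rewrite | github.com/AmachiInori/VSCode | Python/NLP/dict.py | backwardLongestSegment
-- ===== SOURCE A (Python) =====
-- def backwardLongestSegment(text, dic):
--     wordList = []
--     i = len(text) - 1
--     while i >= 0:
--         longest_word = text[i]
--         for j in range(0, i):
--             word = text[j : i + 1]
--             if word in dic:
--                 if len(word) > len(longest_word):
--                     longest_word = word
--                     break
--         wordList.insert(0, longest_word)
--         i -= len(longest_word)
--     return wordList
-- ===== SOURCE B (Python) =====
-- def backwardLongestSegment(text, dic):
--     # Backward maximum matching via a suffix-index (trie emulated by a suffix set):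
--     # at each end position walk leftward, pruning as soon as the current piece is
--     # not a suffix of any dictionary word; keep the longest full-word match.
--     words = {w for w in dic if len(w) >= 2}
--     sufs = {w[k:] for w in words for k in range(len(w))}
--     out = []
--     i = len(text) - 1
--     while i >= 0:
--         best = 1
--         cur = text[i]
--         j = i - 1
--         while j >= 0:
--             cur = text[j] + cur
--             if cur not in sufs:
--                 break
--             if cur in words:
--                 best = i - j + 1
--             j -= 1
--         out.append(text[i - best + 1 : i + 1])
--         i -= best
--     return out[::-1]
-- ===== Notes on version B (the rewrite author's own statement) =====
-- stated objective: faster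
-- what changed: Replaces the per-position scan over all start positions with a list membership test each (O(n^2 * |dic|)) by a precomputed set of dictionary words plus a set of their suffixes: from each end position B walks leftward character by character, stops as soon as the piece is no longer a suffix of any word (trie-style pruning), and records the longest full-word match; output is built by append and reversed once instead of insert(0,...).
import Mathlib
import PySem

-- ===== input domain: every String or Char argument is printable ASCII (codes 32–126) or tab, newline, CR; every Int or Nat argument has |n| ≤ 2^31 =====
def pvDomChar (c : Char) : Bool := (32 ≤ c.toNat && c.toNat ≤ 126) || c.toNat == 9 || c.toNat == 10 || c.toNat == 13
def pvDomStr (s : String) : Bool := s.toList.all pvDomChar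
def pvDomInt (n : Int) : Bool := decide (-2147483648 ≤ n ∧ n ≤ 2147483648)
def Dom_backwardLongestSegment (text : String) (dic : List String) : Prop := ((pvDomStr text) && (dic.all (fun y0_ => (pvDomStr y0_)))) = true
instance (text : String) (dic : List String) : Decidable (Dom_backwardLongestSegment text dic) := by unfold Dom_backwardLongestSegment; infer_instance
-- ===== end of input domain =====

-- B replaces A's per-position scan over all start positions (each a dictionary-list membership
-- test) by a precomputed word set plus a set of word suffixes, walked leftward with trie-style
-- pruning; the output is built by append and reversed once. Return values proved equal below.

-- ===== PORT A =====
-- strings are carried as List Char (String.toList is injective, so `word in dic`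
-- is membership in dic.map String.toList)

-- inner `for j in range(0, i): word = text[j:i+1]; if word in dic: if len(word) > len(longest): longest = word; break`
-- (js is the remaining part of range(0, i); structural recursion over it)
def bwlsFor (t : List Char) (dicL : List (List Char)) (i : Nat) (js : List Nat)
    (longest : List Char) : List Char :=
  match js with
  | [] => longest
  | j :: js' =>
    if PySem.List.slice t (some ((j : Nat) : Int)) (some (((i + 1 : Nat)) : Int)) ∈ dicL ∧
        longest.length < (PySem.List.slice t (some ((j : Nat) : Int)) (some (((i + 1 : Nat)) : Int))).length then
      PySem.List.slice t (some ((j : Nat) : Int)) (some (((i + 1 : Nat)) : Int))  -- break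
    else bwlsFor t dicL i js' longest

-- `while i >= 0: … wordList.insert(0, longest_word); i -= len(longest_word)`
-- fuel is a totality guard only: i starts at len(text)-1 and strictly decreases each
-- iteration, so fuel = len(text) always suffices (the 0-case is unreachable with i ≥ 0)
def bwlsWhile (t : List Char) (dicL : List (List Char)) :
    Nat → Int → List (List Char) → List (List Char)
  | 0, _, acc => acc
  | fuel + 1, i, acc =>
    if i < 0 then acc
    else
      bwlsWhile t dicL fuel
        (i - (bwlsFor t dicL i.toNat (List.range i.toNat) [t.getD i.toNat ' ']).length)
        (bwlsFor t dicL i.toNat (List.range i.toNat) [t.getD i.toNat ' '] :: acc)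

def backwardLongestSegment (text : String) (dic : List String) : List String :=
  (bwlsWhile text.toList (dic.map String.toList) text.toList.length
    ((text.toList.length : Int) - 1) []).map (fun w => String.ofList w)

-- ===== PORT B =====
-- words = {w for w in dic if len(w) >= 2}
def bwlsAltWords (dic : List String) : List (List Char) :=
  PySem.Set.ofList ((dic.map String.toList).filter (fun w => 2 ≤ w.length))

-- sufs = {w[k:] for w in words for k in range(len(w))}   (w[k:] with 0 ≤ k < len w is drop k)
def bwlsAltSufs (words : List (List Char)) : List (List Char) :=
  PySem.Set.ofList (words.flatMap (fun w => (List.range w.length).map (fun k => w.drop k)))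

-- inner `while j >= 0: cur = text[j] + cur; if cur not in sufs: break; if cur in words: best = i - j + 1; j -= 1`
-- (the loop index j is carried shifted as jn = j + 1 : Nat, so the recursion is structural;
--  jn = 0 is exactly the exit condition j < 0)
def bwlsAltInner (t : List Char) (words sufs : List (List Char)) (i : Nat) :
    Nat → Nat → List Char → Nat
  | 0, best, _ => best
  | jn + 1, best, cur =>
    if (t.getD jn ' ' :: cur) ∉ sufs then best  -- break
    else
      bwlsAltInner t words sufs i jn
        (if (t.getD jn ' ' :: cur) ∈ words then i - jn + 1 else best)
        (t.getD jn ' ' :: cur)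

-- outer `while i >= 0: … out.append(text[i-best+1 : i+1]); i -= best`
-- (fuel is a totality guard only, as in port A: best ≥ 1 each iteration)
def bwlsAltWhile (t : List Char) (words sufs : List (List Char)) :
    Nat → Int → List (List Char) → List (List Char)
  | 0, _, out => out
  | fuel + 1, i, out =>
    if i < 0 then out
    else
      bwlsAltWhile t words sufs fuel
        (i - (bwlsAltInner t words sufs i.toNat i.toNat 1 [t.getD i.toNat ' '] : Nat))
        (out ++ [PySem.List.slice t
          (some (i - (bwlsAltInner t words sufs i.toNat i.toNat 1 [t.getD i.toNat ' '] : Nat) + 1))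
          (some (i + 1))])

-- `return out[::-1]` is List.reverse (PySem.List.slice?_none_none_neg_one)
def backwardLongestSegment_alt (text : String) (dic : List String) : List String :=
  ((bwlsAltWhile text.toList (bwlsAltWords dic) (bwlsAltSufs (bwlsAltWords dic))
      text.toList.length ((text.toList.length : Int) - 1) []).reverse).map
    (fun w => String.ofList w)

-- ===== PRECONDITION & SPEC =====
def Spec_backwardLongestSegment (text : String) (dic : List String) (out : List String) : Prop := out = backwardLongestSegment_alt text dic
instance (text : String) (dic : List String) (out : List String) : Decidable (Spec_backwardLongestSegment text dic out) := by unfold Spec_backwardLongestSegment; infer_instance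

-- ===== CLAIM (what is proved, stated in full; the proofs are below) =====
def Claim_equal_backwardLongestSegment : Prop := ∀ (text : String) (dic : List String), Dom_backwardLongestSegment text dic → Spec_backwardLongestSegment text dic (backwardLongestSegment text dic)

-- ===== LEMMAS AND PROOFS =====

-- the candidate word ending at i and starting at j, as a plain drop/take
def sliceW (t : List Char) (i j : Nat) : List Char := List.take (i + 1 - j) (List.drop j t)

theorem sliceW_eq_slice (t : List Char) (i j : Nat) :
    PySem.List.slice t (some ((j : Nat) : Int)) (some (((i + 1 : Nat)) : Int)) = sliceW t i j := by
  rw [PySem.List.slice_natCast]; rfl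

theorem sliceW_length (t : List Char) (i j : Nat) (hi : i < t.length) (hj : j ≤ i) :
    (sliceW t i j).length = i + 1 - j := by
  simp [sliceW]; omega

theorem sliceW_cons (t : List Char) (i j : Nat) (hi : i < t.length) (hj : j ≤ i) :
    sliceW t i j = t.getD j ' ' :: sliceW t i (j + 1) := by
  have hjt : j < t.length := by omega
  rw [sliceW, sliceW, List.drop_eq_getElem_cons hjt, List.getD_eq_getElem t ' ' hjt,
    show i + 1 - j = (i - j) + 1 by omega, List.take_succ_cons,
    show i + 1 - (j + 1) = i - j by omega]

theorem sliceW_single (t : List Char) (i : Nat) (hi : i < t.length) :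
    sliceW t i i = [t.getD i ' '] := by
  rw [sliceW, show i + 1 - i = 1 by omega, List.getD_eq_getElem t ' ' hi,
    List.drop_eq_getElem_cons hi]
  show List.take (0 + 1) (t[i] :: List.drop (i + 1) t) = [t[i]]
  rw [List.take_succ_cons, List.take_zero]

theorem sliceW_drop (t : List Char) (i j j' : Nat) (hj' : j' ≤ j) (hj : j ≤ i) :
    (sliceW t i j').drop (j - j') = sliceW t i j := by
  rw [sliceW, sliceW, List.drop_take, List.drop_drop]
  congr 1
  · omega
  · congr 1; omega

theorem mem_words_iff (dic : List String) (w : List Char) :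
    w ∈ bwlsAltWords dic ↔ (2 ≤ w.length ∧ w ∈ dic.map String.toList) := by
  rw [bwlsAltWords, PySem.Set.mem_ofList, List.mem_filter]
  simp [and_comm]

theorem mem_sufs_of (words : List (List Char)) (w : List Char) (k : Nat)
    (hw : w ∈ words) (hk : k < w.length) : w.drop k ∈ bwlsAltSufs words := by
  rw [bwlsAltSufs, PySem.Set.mem_ofList, List.mem_flatMap]
  exact ⟨w, hw, List.mem_map.mpr ⟨k, List.mem_range.mpr hk, rfl⟩⟩

-- generic: find? only depends on the predicate's values on the list
theorem pv_find?_congr {α : Type} (l : List α) (p q : α → Bool)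
    (h : ∀ x ∈ l, p x = q x) : l.find? p = l.find? q := by
  induction l with
  | nil => rfl
  | cons x xs IH =>
    simp only [List.find?_cons, h x (by simp)]
    cases q x <;> simp [IH (fun y hy => h y (by simp [hy]))]

-- A's inner loop finds the first start j (i.e. the longest word) with text[j:i+1] in dic
theorem bwlsFor_eq_find (t : List Char) (dicL : List (List Char)) (i : Nat) (hi : i < t.length) :
    ∀ (js : List Nat) (longest : List Char), longest.length = 1 → (∀ j ∈ js, j < i) →
      bwlsFor t dicL i js longest =
        match js.find? (fun j => decide (sliceW t i j ∈ dicL)) with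
        | some j => sliceW t i j
        | none => longest := by
  intro js
  induction js with
  | nil => intro longest h _; rfl
  | cons j js' IH =>
    intro longest h hjs
    have hj : j < i := hjs j (by simp)
    rw [bwlsFor, sliceW_eq_slice]
    have hlen : (sliceW t i j).length = i + 1 - j := sliceW_length t i j hi (by omega)
    by_cases hmem : sliceW t i j ∈ dicL
    · rw [if_pos ⟨hmem, by omega⟩, List.find?_cons_of_pos (by simp [hmem])]
    · rw [if_neg (by tauto), List.find?_cons_of_neg (by simp [hmem])]
      exact IH longest h (fun j' hj' => hjs j' (by simp [hj']))

-- B's inner loop computes the same first match, as a best length, pruning via the suffix set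
theorem bwlsAltInner_eq_find (t : List Char) (dic : List String) (i : Nat) (hi : i < t.length) :
    ∀ (jn : Nat) (best : Nat), jn ≤ i →
      bwlsAltInner t (bwlsAltWords dic) (bwlsAltSufs (bwlsAltWords dic)) i jn
          best (sliceW t i jn) =
        match (List.range jn).find? (fun j => decide (sliceW t i j ∈ bwlsAltWords dic)) with
        | some j => i - j + 1
        | none => best := by
  intro jn
  induction jn with
  | zero => intro best _; rfl
  | succ jn IH =>
    intro best hjn
    rw [bwlsAltInner]
    have hcons : t.getD jn ' ' :: sliceW t i (jn + 1) = sliceW t i jn :=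
      (sliceW_cons t i jn hi (by omega)).symm
    rw [hcons]
    by_cases hs : sliceW t i jn ∈ bwlsAltSufs (bwlsAltWords dic)
    · rw [if_neg (by simpa using hs)]
      rw [IH _ (by omega)]
      rw [show List.range (jn + 1) = List.range jn ++ [jn] from List.range_succ, List.find?_append]
      cases hf : (List.range jn).find? (fun j => decide (sliceW t i j ∈ bwlsAltWords dic)) with
      | some j => simp
      | none =>
        by_cases hw : sliceW t i jn ∈ bwlsAltWords dic
        · simp [hw]
        · simp [hw]
    · rw [if_pos (by simpa using hs)]
      have hnone : (List.range (jn + 1)).find?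
          (fun j => decide (sliceW t i j ∈ bwlsAltWords dic)) = none := by
        rw [List.find?_eq_none]
        intro j' hj'
        have hj'lt : j' < jn + 1 := List.mem_range.mp hj'
        simp only [decide_eq_true_eq]
        intro hwmem
        apply hs
        have hdrop : (sliceW t i j').drop (jn - j') = sliceW t i jn :=
          sliceW_drop t i jn j' (by omega) (by omega)
        have hlen : (sliceW t i j').length = i + 1 - j' := sliceW_length t i j' hi (by omega)
        rw [← hdrop]
        exact mem_sufs_of _ _ _ hwmem (by omega)
      rw [hnone]

-- the step agreement: at position i both sides pick the same word
theorem step_eq (t : List Char) (dic : List String) (i : Nat) (hi : i < t.length) :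
    bwlsFor t (dic.map String.toList) i (List.range i) [t.getD i ' '] =
      PySem.List.slice t
        (some ((i : Int) - (bwlsAltInner t (bwlsAltWords dic) (bwlsAltSufs (bwlsAltWords dic))
            i i 1 [t.getD i ' '] : Nat) + 1))
        (some ((i : Int) + 1)) ∧
    (bwlsFor t (dic.map String.toList) i (List.range i) [t.getD i ' ']).length =
      bwlsAltInner t (bwlsAltWords dic) (bwlsAltSufs (bwlsAltWords dic))
        i i 1 [t.getD i ' '] := by
  have hA := bwlsFor_eq_find t (dic.map String.toList) i hi (List.range i) [t.getD i ' ']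
    (by simp) (fun j hj => List.mem_range.mp hj)
  have hB := bwlsAltInner_eq_find t dic i hi i 1 (le_refl i)
  rw [sliceW_single t i hi] at hB
  have hcong : (List.range i).find? (fun j => decide (sliceW t i j ∈ dic.map String.toList)) =
      (List.range i).find? (fun j => decide (sliceW t i j ∈ bwlsAltWords dic)) := by
    apply pv_find?_congr
    intro j' hj'
    have hj'i : j' < i := List.mem_range.mp hj'
    have hlen : (sliceW t i j').length = i + 1 - j' := sliceW_length t i j' hi (by omega)
    simp only [decide_eq_decide, mem_words_iff]
    constructor
    · intro h; exact ⟨by omega, h⟩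
    · intro h; exact h.2
  rw [hcong] at hA
  cases hf : (List.range i).find? (fun j => decide (sliceW t i j ∈ bwlsAltWords dic)) with
  | none =>
    simp only [hf] at hA hB
    rw [hA, hB]
    constructor
    · rw [show (i : Int) - ((1 : Nat) : Int) + 1 = ((i : Nat) : Int) by push_cast; ring]
      rw [show ((i : Nat) : Int) + 1 = (((i + 1 : Nat)) : Int) by push_cast; ring]
      rw [sliceW_eq_slice, sliceW_single t i hi]
    · simp
  | some j' =>
    have hj'i : j' < i := List.mem_range.mp (List.mem_of_find?_eq_some hf)
    simp only [hf] at hA hB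
    rw [hA, hB]
    constructor
    · rw [show (i : Int) - ((i - j' + 1 : Nat) : Int) + 1 = ((j' : Nat) : Int) by omega]
      rw [show ((i : Nat) : Int) + 1 = (((i + 1 : Nat)) : Int) by push_cast; ring]
      rw [sliceW_eq_slice]
    · rw [sliceW_length t i j' hi (Nat.le_of_lt hj'i)]
      exact Nat.sub_add_comm (Nat.le_of_lt hj'i)

-- the accumulator factors out of A's loop
theorem bwlsWhile_acc (t : List Char) (dicL : List (List Char)) :
    ∀ (fuel : Nat) (i : Int) (acc : List (List Char)),
      bwlsWhile t dicL fuel i acc = bwlsWhile t dicL fuel i [] ++ acc := by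
  intro fuel
  induction fuel with
  | zero => intro i acc; rfl
  | succ fuel IH =>
    intro i acc
    by_cases hg : i < 0
    · conv_lhs => rw [bwlsWhile, if_pos hg]
      conv_rhs => rw [bwlsWhile, if_pos hg]
      simp
    · conv_lhs => rw [bwlsWhile, if_neg hg]
      conv_rhs => rw [bwlsWhile, if_neg hg]
      rw [IH _ (bwlsFor t dicL i.toNat (List.range i.toNat) [t.getD i.toNat ' '] :: acc),
        IH _ (bwlsFor t dicL i.toNat (List.range i.toNat) [t.getD i.toNat ' '] :: [])]
      simp

-- the out list factors out of B's loop
theorem bwlsAltWhile_out (t : List Char) (words sufs : List (List Char)) :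
    ∀ (fuel : Nat) (i : Int) (out : List (List Char)),
      bwlsAltWhile t words sufs fuel i out = out ++ bwlsAltWhile t words sufs fuel i [] := by
  intro fuel
  induction fuel with
  | zero => intro i out; simp [bwlsAltWhile]
  | succ fuel IH =>
    intro i out
    by_cases hg : i < 0
    · conv_lhs => rw [bwlsAltWhile, if_pos hg]
      conv_rhs => rw [bwlsAltWhile, if_pos hg]
      simp
    · conv_lhs => rw [bwlsAltWhile, if_neg hg]
      conv_rhs => rw [bwlsAltWhile, if_neg hg]
      rw [IH _ (out ++ [PySem.List.slice t
          (some (i - (bwlsAltInner t words sufs i.toNat i.toNat 1 [t.getD i.toNat ' '] : Nat) + 1))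
          (some (i + 1))]),
        IH _ ([] ++ [PySem.List.slice t
          (some (i - (bwlsAltInner t words sufs i.toNat i.toNat 1 [t.getD i.toNat ' '] : Nat) + 1))
          (some (i + 1))])]
      simp

-- the two outer loops produce reverse lists of the same segments
theorem while_eq (t : List Char) (dic : List String) :
    ∀ (fuel : Nat) (i : Int), i < (t.length : Int) →
      bwlsWhile t (dic.map String.toList) fuel i [] =
        (bwlsAltWhile t (bwlsAltWords dic) (bwlsAltSufs (bwlsAltWords dic)) fuel i []).reverse := by
  intro fuel
  induction fuel with
  | zero => intro i _; rfl
  | succ fuel IH =>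
    intro i hi
    by_cases hneg : i < 0
    · conv_lhs => rw [bwlsWhile, if_pos hneg]
      conv_rhs => rw [bwlsAltWhile, if_pos hneg]
      rfl
    · have hitn : ((i.toNat : Nat) : Int) = i := Int.toNat_of_nonneg (by omega)
      have hstep := step_eq t dic i.toNat (by omega)
      rw [hitn] at hstep
      conv_lhs => rw [bwlsWhile, if_neg hneg]
      conv_rhs => rw [bwlsAltWhile, if_neg hneg]
      rw [bwlsWhile_acc t (dic.map String.toList),
        bwlsAltWhile_out t (bwlsAltWords dic) (bwlsAltSufs (bwlsAltWords dic))]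
      rw [List.reverse_append]
      rw [hstep.2, hstep.1]
      congr 1
      exact IH _ (by omega)

-- ===== VERDICT (by name: the statement is the Claim_ definition above) =====
theorem backwardLongestSegment_spec : Claim_equal_backwardLongestSegment := by
  unfold Claim_equal_backwardLongestSegment Spec_backwardLongestSegment
  intro text dic _
  unfold backwardLongestSegment backwardLongestSegment_alt
  exact congrArg (List.map (fun w => String.ofList w))
    (while_eq text.toList dic text.toList.length ((text.toList.length : Int) - 1) (by omega))
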